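-- pv_equiv track=rewrite | github.com/Suchitra1912/coding-challenges | coding_challenge_37/solution.py | number_increasing_pattern
-- ===== SOURCE A (Python) =====
-- def number_increasing_pattern(n):
--     if n <= 0:
--         return "Error"
--
--     pattern = []
--     for i in range(1, n + 1):
--         row = "".join(str(num) for num in range(1, i + 1))
--         pattern.append(row)
--
--     return pattern
-- ===== SOURCE B (Python) =====
-- def number_increasing_pattern(n):
--     if n <= 0:
--         return "Error"
--
--     pattern = []
--     prefix = ""
--     for i in range(1, n + 1):
--         prefix += str(i)
--         pattern.append(prefix)
--
--     return pattern
-- ===== Notes on version B (the rewrite author's own statement) =====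
-- stated objective: alternative
-- what changed: B keeps a running string prefix extended by str(i) each step instead of rebuilding every row with an inner join over range(1, i+1), turning A's nested build into a single accumulating pass.
-- outside the precondition, e.g. on number_increasing_pattern(0): A returns 'Error', B returns 'Error'
import Mathlib
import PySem

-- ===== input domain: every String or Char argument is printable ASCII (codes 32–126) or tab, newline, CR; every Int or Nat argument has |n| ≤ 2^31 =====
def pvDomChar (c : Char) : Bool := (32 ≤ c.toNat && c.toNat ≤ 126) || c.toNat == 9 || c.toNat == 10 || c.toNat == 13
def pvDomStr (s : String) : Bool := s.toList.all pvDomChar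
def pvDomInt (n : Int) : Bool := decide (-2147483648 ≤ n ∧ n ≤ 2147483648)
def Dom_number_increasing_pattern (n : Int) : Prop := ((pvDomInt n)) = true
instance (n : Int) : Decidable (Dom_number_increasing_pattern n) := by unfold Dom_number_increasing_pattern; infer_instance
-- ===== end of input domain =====

-- B replaces A's per-row inner join over range(1, i+1) by a single running string
-- accumulator extended once per step (objective: alternative decomposition, one accumulating pass).

-- ===== PORT A =====
-- for i in range(1, n+1): row = "".join(str(num) for num in range(1, i+1)); pattern.append(row)
def number_increasing_pattern (n : Int) : List String :=
  (PySem.List.pyRange 1 (n + 1)).foldl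
    (fun pattern i =>
      pattern ++ [PySem.Str.join "" ((PySem.List.pyRange 1 (i + 1)).map PySem.Int.toStr)])
    []

-- ===== PORT B =====
-- prefix = ""; for i in range(1, n+1): prefix += str(i); pattern.append(prefix)
def number_increasing_pattern_alt (n : Int) : List String :=
  ((PySem.List.pyRange 1 (n + 1)).foldl
    (fun st i =>
      let p := st.1 ++ PySem.Int.toStr i
      (p, st.2 ++ [p]))
    (("" : String), ([] : List String))).2

-- ===== PRECONDITION & SPEC =====
-- Pre_ excludes n ≤ 0, where A returns the string "Error" instead of a value of the
-- declared list-of-strings return type (and B does the same).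
def Pre_number_increasing_pattern (n : Int) : Prop := 1 ≤ n
instance (n : Int) : Decidable (Pre_number_increasing_pattern n) := by
  unfold Pre_number_increasing_pattern; infer_instance
def pvWitness_number_increasing_pattern : Int := (3)

def Spec_number_increasing_pattern (n : Int) (out : List String) : Prop := out = number_increasing_pattern_alt n
instance (n : Int) (out : List String) : Decidable (Spec_number_increasing_pattern n out) := by unfold Spec_number_increasing_pattern; infer_instance

-- ===== CLAIM (what is proved, stated in full; the proofs are below) =====
def Claim_equal_number_increasing_pattern : Prop := ∀ (n : Int), Dom_number_increasing_pattern n → Pre_number_increasing_pattern n → Spec_number_increasing_pattern n (number_increasing_pattern n)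

-- ===== LEMMAS AND PROOFS =====

-- "".join with empty separator is flatten (fact about PySem.Chars.join, specific use below)
theorem chars_join_empty (xs : List (List Char)) : PySem.Chars.join [] xs = xs.flatten := by
  simp [PySem.Chars.join, List.intercalate]
  induction xs with
  | nil => simp
  | cons h t ih => cases t <;> simp_all [List.intersperse]

theorem str_join_empty_append (xs : List String) (y : String) :
    PySem.Str.join "" (xs ++ [y]) = PySem.Str.join "" xs ++ y := by
  apply String.toList_inj.mp
  simp [PySem.Str.join, chars_join_empty]

-- A's row for index i
def pvRow (i : Int) : String :=
  PySem.Str.join "" ((PySem.List.pyRange 1 (i + 1)).map PySem.Int.toStr)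

-- invariant of B's single pass: the running prefix is A's current row and the
-- accumulated list is the list of rows
theorem b_fold_invariant (b : Int) (hb : 1 ≤ b) :
    (PySem.List.pyRange 1 (b + 1)).foldl
      (fun st i =>
        let p := st.1 ++ PySem.Int.toStr i
        (p, st.2 ++ [p]))
      (("" : String), ([] : List String))
    = (pvRow b, (PySem.List.pyRange 1 (b + 1)).map pvRow) := by
  induction b, hb using Int.le_induction with
  | base => decide
  | succ b hb ih =>
    rw [PySem.List.pyRange_one_succ_right (by omega : (1:Int) ≤ b + 1),
        List.foldl_append, ih]
    simp only [List.foldl, List.map_append, List.map_cons, List.map_nil]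
    have hrow : pvRow b ++ PySem.Int.toStr (b + 1) = pvRow (b + 1) := by
      unfold pvRow
      rw [PySem.List.pyRange_one_succ_right (by omega : (1:Int) ≤ b + 1),
          List.map_append, List.map_cons, List.map_nil, str_join_empty_append]
    rw [hrow]

-- ===== VERDICT (by name: the statement is the Claim_ definition above) =====
theorem number_increasing_pattern_spec : Claim_equal_number_increasing_pattern := by
  intro n _ hn
  show number_increasing_pattern n = number_increasing_pattern_alt n
  unfold number_increasing_pattern number_increasing_pattern_alt
  rw [PySem.List.foldl_append_singleton_eq_map, b_fold_invariant n hn]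
  rfl
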